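-- pv_equiv track=rewrite | github.com/stardust1689/Exercises | exercises.py | pentagonal
-- ===== SOURCE A (Python) =====
-- def pentagonal(number):
--     '''
--     Consider a group of marbles arranged as a series of pentagons with a single marble at the center surrounded by a pentagon of 2 marbles per side, surrounded by another pentagon with 3 per side, etc.
--
--     This function returns the total number of marbles depending on how many sides the outermost pentagon is, or how "deep" the series is.
--     '''
--     total = 1
--     if int(number) != number or number < 1:
--         return 0
--     if number > 1:
--         for num in range(2, number+1):
--             total += 5 * (num - 1)
--     return total
-- ===== SOURCE B (Python) =====
-- def pentagonal(number):
--     # Closed form: 1 + 5 * T(number-1) where T is a triangular number.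
--     if number < 1:
--         return 0
--     return 1 + 5 * (number * (number - 1) // 2)
-- ===== Notes on version B (the rewrite author's own statement) =====
-- stated objective: faster
-- what changed: Replaced the O(n) accumulation loop over range(2, n+1) with the closed-form arithmetic-series formula 1 + 5*n*(n-1)//2.
import Mathlib
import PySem

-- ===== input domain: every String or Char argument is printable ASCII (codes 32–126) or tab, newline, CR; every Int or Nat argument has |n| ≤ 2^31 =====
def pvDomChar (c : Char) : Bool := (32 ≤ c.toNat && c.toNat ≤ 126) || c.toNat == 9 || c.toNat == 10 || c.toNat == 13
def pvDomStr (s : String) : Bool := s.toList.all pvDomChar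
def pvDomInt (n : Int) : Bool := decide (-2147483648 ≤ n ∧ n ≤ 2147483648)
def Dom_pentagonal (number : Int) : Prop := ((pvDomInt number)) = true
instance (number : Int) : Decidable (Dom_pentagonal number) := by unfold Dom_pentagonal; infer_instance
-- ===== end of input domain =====

-- B replaces A's O(n) accumulation loop with the closed-form arithmetic-series formula (objective: faster).

-- ===== PORT A =====
-- total = 1; if int(number) != number or number < 1: return 0  (int(number) != number is
-- identically false for an Int argument); if number > 1: loop over range(2, number+1).
def pentagonal (number : Int) : Int :=
  let total : Int := 1
  if number < 1 then 0
  else if number > 1 then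
    (PySem.List.pyRange 2 (number + 1) 1).foldl (fun total num => total + 5 * (num - 1)) total
  else total

-- ===== PORT B =====
def pentagonal_alt (number : Int) : Int :=
  if number < 1 then 0
  else 1 + 5 * PySem.Int.floordiv (number * (number - 1)) 2

-- ===== PRECONDITION & SPEC =====
def Spec_pentagonal (number : Int) (out : Int) : Prop := out = pentagonal_alt number
instance (number : Int) (out : Int) : Decidable (Spec_pentagonal number out) := by unfold Spec_pentagonal; infer_instance

-- ===== CLAIM (what is proved, stated in full; the proofs are below) =====
def Claim_equal_pentagonal : Prop := ∀ (number : Int), Dom_pentagonal number → Spec_pentagonal number (pentagonal number)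

-- ===== LEMMAS AND PROOFS =====

theorem pv_fold_sum (k : Nat) :
    2 * ((PySem.List.pyRange 2 (2 + (k : Int)) 1).foldl
        (fun total num => total + 5 * (num - 1)) 1) = 2 + 5 * (k : Int) * ((k : Int) + 1) := by
  induction k with
  | zero => decide
  | succ m ih =>
      have hsplit : PySem.List.pyRange 2 (2 + ((m + 1 : Nat) : Int)) 1
          = PySem.List.pyRange 2 (2 + (m : Int)) 1 ++ [2 + (m : Int)] := by
        have : ((m + 1 : Nat) : Int) = (m : Int) + 1 := by push_cast; ring
        rw [this, show (2 : Int) + ((m : Int) + 1) = (2 + (m : Int)) + 1 from by ring]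
        exact PySem.List.pyRange_one_succ_right (by omega)
      rw [hsplit, List.foldl_append]
      simp only [List.foldl_cons, List.foldl_nil]
      push_cast
      linarith [ih]

-- ===== VERDICT (by name: the statement is the Claim_ definition above) =====
theorem pentagonal_spec : Claim_equal_pentagonal := by
  intro number _
  unfold Spec_pentagonal pentagonal pentagonal_alt
  by_cases h1 : number < 1
  · simp [h1]
  · simp only [h1, if_false]
    have hfd : PySem.Int.floordiv (number * (number - 1)) 2 = number * (number - 1) / 2 :=
      PySem.Int.floordiv_eq_ediv_of_pos (by omega)
    rw [hfd]
    by_cases h2 : number > 1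
    · simp only [h2, if_true]
      set k : Nat := (number - 1).toNat with hk
      have hn : number = (k : Int) + 1 := by omega
      have hs := pv_fold_sum k
      rw [show (2 : Int) + (k : Int) = number + 1 from by omega] at hs
      rw [show (2 : Int) + 5 * (k : Int) * ((k : Int) + 1)
            = 2 + 5 * (number * (number - 1)) from by rw [hn]; ring] at hs
      generalize hM : number * (number - 1) = M at hs ⊢
      omega
    · have hn1 : number = 1 := by omega
      simp [hn1]
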